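-- pv_equiv track=rewrite | github.com/maxfarnham/CS491Proj | Scripts/naive/text_manip.py | create_simple_feature_vector
-- ===== SOURCE A (Python) =====
-- def create_simple_feature_vector(raw_html):
--     countPeriod = 0
--     countComma = 0
--     countQuestion = 0
--     countExclamation = 0
--     countWspace = 0
--     countLetters = 0
--     longestWordLength = 0
--     currentWordLength = 0
--     for letter in raw_html:
--         countLetters+=1
--         if letter == '.':
--             countPeriod+=1
--         if letter == ',':
--             countComma+=1
--         if letter == '?':
--             countQuestion+=1
--         if letter == '!':
--             countExclamation+=1
--         if letter == ' ':
--             countWspace+=1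
--             if currentWordLength > longestWordLength:
--                 longestWordLength = currentWordLength
--             currentWordLength = 0
--         else:
--             currentWordLength+=1
--     return str(countPeriod) + ',' + str(countComma) + ',' + str(countQuestion) + ',' + str(countExclamation) + ',' + str(countLetters) + ',' + str(longestWordLength) + ',' + str(countWspace) + ','
-- ===== SOURCE B (Python) =====
-- def create_simple_feature_vector(raw_html):
--     # Longest "word" = longest run between spaces; the segment after the last
--     # space (or the whole string when there is none) never counts, since the
--     # running maximum is only updated when a space is seen.
--     parts = raw_html.split(' ')
--     longest = max((len(p) for p in parts[:-1]), default=0)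
--     fields = (raw_html.count('.'), raw_html.count(','), raw_html.count('?'),
--               raw_html.count('!'), len(raw_html), longest, raw_html.count(' '))
--     return ','.join(str(x) for x in fields) + ','
-- ===== Notes on version B (the rewrite author's own statement) =====
-- stated objective: faster
-- what changed: Replaces the single hand-rolled per-character loop with eight-field state by one str.count call per counted character, len() for the letter count, and a space-split-based maximum over the lengths of all but the last segment for the longest-word field, joined with str.join.
import Mathlib
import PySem

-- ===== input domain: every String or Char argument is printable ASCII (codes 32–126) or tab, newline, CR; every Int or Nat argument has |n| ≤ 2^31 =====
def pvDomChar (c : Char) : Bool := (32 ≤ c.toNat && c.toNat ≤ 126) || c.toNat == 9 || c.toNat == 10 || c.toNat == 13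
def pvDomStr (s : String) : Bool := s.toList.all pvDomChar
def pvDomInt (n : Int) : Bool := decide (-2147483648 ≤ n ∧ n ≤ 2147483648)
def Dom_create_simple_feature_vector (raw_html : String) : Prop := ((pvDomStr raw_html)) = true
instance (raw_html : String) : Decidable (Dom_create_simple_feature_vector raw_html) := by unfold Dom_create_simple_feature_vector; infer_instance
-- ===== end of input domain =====

-- B replaces A's single hand-rolled counting loop by str.count / len / a space-split-based
-- maximum over all but the last segment, joined with str.join; measured faster (constant factor:
-- built-in scans instead of a per-character Python loop).

-- ===== PORT A =====
-- loop state: (countPeriod, countComma, countQuestion, countExclamation, countWspace,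
--              countLetters, longestWordLength, currentWordLength)
def pvStepA (st : Int × Int × Int × Int × Int × Int × Int × Int) (letter : Char) :
    Int × Int × Int × Int × Int × Int × Int × Int :=
  match st with
  | (cp, cc, cq, ce, cw, cl, lng, cur) =>
    let cl := cl + 1
    let cp := if letter = '.' then cp + 1 else cp
    let cc := if letter = ',' then cc + 1 else cc
    let cq := if letter = '?' then cq + 1 else cq
    let ce := if letter = '!' then ce + 1 else ce
    if letter = ' ' then
      (cp, cc, cq, ce, cw + 1, cl, if cur > lng then cur else lng, 0)
    else
      (cp, cc, cq, ce, cw, cl, lng, cur + 1)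

def create_simple_feature_vector (raw_html : String) : String :=
  match raw_html.toList.foldl pvStepA (0, 0, 0, 0, 0, 0, 0, 0) with
  | (cp, cc, cq, ce, cw, cl, lng, _) =>
    PySem.Int.toStr cp ++ "," ++ PySem.Int.toStr cc ++ "," ++ PySem.Int.toStr cq ++ ","
      ++ PySem.Int.toStr ce ++ "," ++ PySem.Int.toStr cl ++ "," ++ PySem.Int.toStr lng ++ ","
      ++ PySem.Int.toStr cw ++ ","

-- ===== PORT B =====
def create_simple_feature_vector_alt (raw_html : String) : String :=
  -- parts = raw_html.split(' ')  (sep ≠ "", so PySem.Chars.splitOn is the exact form)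
  let parts := PySem.Chars.splitOn raw_html.toList [' ']
  -- max((len(p) for p in parts[:-1]), default=0): xs[:-1] is dropLast, max(…, default) is maxD
  let longest : Int := PySem.List.maxD (parts.dropLast.map (fun p => (p.length : Int))) (fun x => x) 0
  let fields : List Int :=
    [(PySem.Str.count raw_html "." : Int), (PySem.Str.count raw_html "," : Int),
     (PySem.Str.count raw_html "?" : Int), (PySem.Str.count raw_html "!" : Int),
     PySem.Str.len raw_html, longest, (PySem.Str.count raw_html " " : Int)]
  PySem.Str.join "," (fields.map PySem.Int.toStr) ++ ","

-- ===== PRECONDITION & SPEC =====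
def Spec_create_simple_feature_vector (raw_html : String) (out : String) : Prop := out = create_simple_feature_vector_alt raw_html
instance (raw_html : String) (out : String) : Decidable (Spec_create_simple_feature_vector raw_html out) := by unfold Spec_create_simple_feature_vector; infer_instance

-- ===== CLAIM (what is proved, stated in full; the proofs are below) =====
def Claim_equal_create_simple_feature_vector : Prop := ∀ (raw_html : String), Dom_create_simple_feature_vector raw_html → Spec_create_simple_feature_vector raw_html (create_simple_feature_vector raw_html)

-- ===== LEMMAS AND PROOFS =====

-- structural version of splitting on a single space character
def pvSplit : List Char → List (List Char)
  | [] => [[]]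
  | c :: cs => if c = ' ' then [] :: pvSplit cs else (pvSplit cs).modifyHead (c :: ·)

theorem pvSplit_ne_nil (cs : List Char) : pvSplit cs ≠ [] := by
  cases cs with
  | nil => simp [pvSplit]
  | cons c cs =>
    simp only [pvSplit]
    split <;> simp [List.modifyHead_eq_nil_iff, pvSplit_ne_nil cs]

theorem splitOn_go_eq (fuel : Nat) (l cur : List Char) (acc : List (List Char))
    (h : l.length ≤ fuel) :
    PySem.Chars.splitOn.go [' '] fuel l cur acc =
      acc.reverse ++ (match pvSplit l with
        | [] => []
        | p :: ps => (cur.reverse ++ p) :: ps) := by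
  induction fuel generalizing l cur acc with
  | zero =>
    have : l = [] := by cases l with | nil => rfl | cons a l => simp at h
    subst this
    simp [PySem.Chars.splitOn.go, pvSplit]
  | succ fuel ih =>
    cases l with
    | nil => simp [PySem.Chars.splitOn.go, pvSplit]
    | cons c rest =>
      by_cases hc : c = ' '
      · subst hc
        have hpre : [' '].isPrefixOf (' ' :: rest) = true := by simp [List.isPrefixOf]
        simp only [PySem.Chars.splitOn.go, hpre, if_pos, List.length_singleton, List.drop_succ_cons,
          List.drop_zero]
        rw [ih rest [] (cur.reverse :: acc) (by simpa using Nat.le_of_succ_le_succ h)]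
        rcases hps : pvSplit rest with _ | ⟨p, ps⟩
        · exact absurd hps (pvSplit_ne_nil rest)
        · simp [pvSplit, hps]
      · have hpre : [' '].isPrefixOf (c :: rest) = false := by
          simp only [List.isPrefixOf, Bool.and_eq_false_iff]
          left
          exact beq_eq_false_iff_ne.mpr (fun e => hc e.symm)
        simp only [PySem.Chars.splitOn.go, hpre]
        rw [ih rest (c :: cur) acc (by simpa using Nat.le_of_succ_le_succ h)]
        rcases hps : pvSplit rest with _ | ⟨p, ps⟩
        · exact absurd hps (pvSplit_ne_nil rest)
        · simp [pvSplit, hc, hps, List.append_assoc]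

theorem splitOn_eq_pvSplit (cs : List Char) :
    PySem.Chars.splitOn cs [' '] = pvSplit cs := by
  unfold PySem.Chars.splitOn
  rw [splitOn_go_eq (cs.length + 1) cs [] [] (Nat.le_succ _)]
  rcases hps : pvSplit cs with _ | ⟨p, ps⟩
  · exact absurd hps (pvSplit_ne_nil cs)
  · simp

-- single-character substring count is character count
theorem count_go_singleton (ch : Char) (fuel : Nat) (l : List Char) (acc : Nat)
    (h : l.length ≤ fuel) :
    PySem.Chars.count.go [ch] fuel l acc = acc + l.count ch := by
  induction fuel generalizing l acc with
  | zero =>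
    have : l = [] := by cases l with | nil => rfl | cons a l => simp at h
    subst this
    simp [PySem.Chars.count.go]
  | succ fuel ih =>
    cases l with
    | nil => simp [PySem.Chars.count.go]
    | cons c rest =>
      by_cases hc : c = ch
      · subst hc
        have hpre : [c].isPrefixOf (c :: rest) = true := by simp [List.isPrefixOf]
        simp only [PySem.Chars.count.go, hpre, if_pos, List.length_singleton, List.drop_succ_cons,
          List.drop_zero]
        rw [ih rest (acc + 1) (by simpa using Nat.le_of_succ_le_succ h)]
        simp
        omega
      · have hpre : [ch].isPrefixOf (c :: rest) = false := by
          simp only [List.isPrefixOf, Bool.and_eq_false_iff]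
          left
          exact beq_eq_false_iff_ne.mpr (fun e => hc e.symm)
        simp only [PySem.Chars.count.go, hpre]
        rw [ih rest acc (by simpa using Nat.le_of_succ_le_succ h)]
        simp [hc]

theorem count_singleton (cs : List Char) (ch : Char) :
    PySem.Chars.count cs [ch] = cs.count ch := by
  unfold PySem.Chars.count
  simpa using count_go_singleton ch cs.length cs 0 le_rfl

-- the (longest, current) pair of A's loop, in isolation
def pvWord : List Char → Int → Int → Int × Int
  | [], lng, cur => (lng, cur)
  | c :: cs, lng, cur =>
    if c = ' ' then pvWord cs (if cur > lng then cur else lng) 0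
    else pvWord cs lng (cur + 1)

-- A's whole loop, componentwise
theorem foldA_eq (cs : List Char) (cp cc cq ce cw cl lng cur : Int) :
    cs.foldl pvStepA (cp, cc, cq, ce, cw, cl, lng, cur) =
      (cp + cs.count '.', cc + cs.count ',', cq + cs.count '?', ce + cs.count '!',
       cw + cs.count ' ', cl + cs.length, pvWord cs lng cur) := by
  induction cs generalizing cp cc cq ce cw cl lng cur with
  | nil => simp [pvWord]
  | cons c rest ih =>
    simp only [List.foldl_cons, pvStepA]
    by_cases h1 : c = ' '
    · subst h1
      simp only [reduceIte]
      rw [ih]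
      simp only [pvWord, if_true]
      simp
      omega
    · rw [if_neg h1, ih]
      simp only [pvWord, if_neg h1]
      simp [List.count_cons, h1]
      split_ifs <;> simp_all <;> omega

-- the running (longest, current) pair against the split segments
def pvH : List (List Char) → Int → Int → Int
  | [], lng, _ => lng
  | [_], lng, _ => lng
  | p :: ps, lng, cur => pvH ps (if cur + (p.length : Int) > lng then cur + (p.length : Int) else lng) 0

theorem pvWord_eq_pvH (cs : List Char) (lng cur : Int) :
    (pvWord cs lng cur).1 = pvH (pvSplit cs) lng cur := by
  induction cs generalizing lng cur with
  | nil => simp [pvWord, pvSplit, pvH]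
  | cons c rest ih =>
    by_cases hc : c = ' '
    · subst hc
      simp only [pvWord, pvSplit, if_true]
      rw [ih]
      rcases hps : pvSplit rest with _ | ⟨p, ps⟩
      · exact absurd hps (pvSplit_ne_nil rest)
      · simp [pvH]
    · simp only [pvWord, pvSplit, if_neg hc]
      rw [ih]
      rcases hps : pvSplit rest with _ | ⟨p, ps⟩
      · exact absurd hps (pvSplit_ne_nil rest)
      · cases ps with
        | nil => simp [pvH]
        | cons q qs =>
          simp only [List.modifyHead, pvH]
          have e : cur + ((c :: p).length : Int) = cur + 1 + (p.length : Int) := by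
            push_cast [List.length_cons]; omega
          rw [e]

theorem pvH_eq_foldl (ps : List (List Char)) (lng : Int) :
    pvH ps lng 0 = (ps.dropLast.map (fun p => (p.length : Int))).foldl max lng := by
  induction ps generalizing lng with
  | nil => simp [pvH]
  | cons p ps ih =>
    cases ps with
    | nil => simp [pvH]
    | cons q qs =>
      simp only [pvH, List.dropLast_cons₂, List.map_cons, List.foldl_cons, zero_add, ih]
      congr 1
      rcases le_or_gt (p.length : Int) lng with h | h
      · rw [if_neg (by omega), max_eq_left h]
      · rw [if_pos h, max_eq_right (le_of_lt h)]

-- max(xs, default=0) over segment lengths is the running-max fold from 0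
theorem maxD_lengths (xs : List (List Char)) :
    PySem.List.maxD (xs.map (fun p => (p.length : Int))) (fun x => x) 0 =
      (xs.map (fun p => (p.length : Int))).foldl max 0 := by
  cases xs with
  | nil => simp [PySem.List.maxD, PySem.List.max?]
  | cons p t =>
    simp only [List.map_cons, PySem.List.maxD, PySem.List.max?_id_cons, Option.getD_some,
      List.foldl_cons]
    rw [max_eq_right (by positivity)]

theorem join7 (s1 s2 s3 s4 s5 s6 s7 : String) :
    PySem.Str.join "," [s1, s2, s3, s4, s5, s6, s7] =
      s1 ++ "," ++ s2 ++ "," ++ s3 ++ "," ++ s4 ++ "," ++ s5 ++ "," ++ s6 ++ "," ++ s7 := by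
  apply String.toList_inj.mp
  simp [PySem.Str.join, PySem.Chars.join, List.intercalate, List.intersperse]

-- ===== VERDICT (by name: the statement is the Claim_ definition above) =====
theorem create_simple_feature_vector_spec : Claim_equal_create_simple_feature_vector := by
  intro raw _
  unfold Spec_create_simple_feature_vector create_simple_feature_vector create_simple_feature_vector_alt
  rw [foldA_eq]
  simp only [zero_add]
  rw [splitOn_eq_pvSplit, maxD_lengths, ← pvH_eq_foldl, ← pvWord_eq_pvH]
  simp only [List.map_cons, List.map_nil]
  rw [join7]
  simp only [PySem.Str.count, PySem.Str.len_eq]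
  rw [show (".".toList) = ['.'] from rfl, show (",".toList) = [','] from rfl,
    show ("?".toList) = ['?'] from rfl, show ("!".toList) = ['!'] from rfl,
    show (" ".toList) = [' '] from rfl]
  rw [count_singleton, count_singleton, count_singleton, count_singleton, count_singleton]
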